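-- pv_equiv track=rewrite | github.com/tondeni/AI_Agent-FSC_Developer | utils.py | format_safety_goals_summary
-- ===== SOURCE A (Python) =====
-- def format_safety_goals_summary(safety_goals):
--     """
--     Format safety goals for display.
--     """
--
--     if not safety_goals:
--         return "No safety goals found"
--
--     summary = f"Total Safety Goals: {len(safety_goals)}\n\n"
--
--     # Group by ASIL
--     by_asil = {}
--     for sg in safety_goals:
--         asil = sg.get('asil', 'Unknown')
--         if asil not in by_asil:
--             by_asil[asil] = []
--         by_asil[asil].append(sg)
--
--     # Display by ASIL level (D -> C -> B -> A)
--     for asil in ['D', 'C', 'B', 'A']: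
--         if asil in by_asil:
--             summary += f"\n**ASIL {asil}** ({len(by_asil[asil])} goals):\n"
--             for sg in by_asil[asil][:5]:
--                 summary += f"- {sg['id']}: {sg['description'][:80]}...\n"
--             if len(by_asil[asil]) > 5:
--                 summary += f"  ... and {len(by_asil[asil]) - 5} more\n"
--
--     return summary
-- ===== SOURCE B (Python) =====
-- def _section(asil, goals):
--     group = [sg for sg in goals if sg.get('asil', 'Unknown') == asil]
--     if not group:
--         return ""
--     lines = [f"\n**ASIL {asil}** ({len(group)} goals):\n"]
--     lines += [f"- {sg['id']}: {sg['description'][:80]}...\n" for sg in group[:5]]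
--     if len(group) > 5:
--         lines.append(f"  ... and {len(group) - 5} more\n")
--     return "".join(lines)
--
--
-- def format_safety_goals_summary(safety_goals):
--     if not safety_goals:
--         return "No safety goals found"
--     return f"Total Safety Goals: {len(safety_goals)}\n\n" + "".join(
--         _section(asil, safety_goals) for asil in ['D', 'C', 'B', 'A'])
-- ===== Notes on version B (the rewrite author's own statement) =====
-- stated objective: simpler
-- what changed: B drops A's build-a-grouping-dictionary pass entirely: it formats each ASIL section independently by filtering the input list for that level and joins the four sections, instead of A's dict-of-lists accumulation followed by lookups.
import Mathlib
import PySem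

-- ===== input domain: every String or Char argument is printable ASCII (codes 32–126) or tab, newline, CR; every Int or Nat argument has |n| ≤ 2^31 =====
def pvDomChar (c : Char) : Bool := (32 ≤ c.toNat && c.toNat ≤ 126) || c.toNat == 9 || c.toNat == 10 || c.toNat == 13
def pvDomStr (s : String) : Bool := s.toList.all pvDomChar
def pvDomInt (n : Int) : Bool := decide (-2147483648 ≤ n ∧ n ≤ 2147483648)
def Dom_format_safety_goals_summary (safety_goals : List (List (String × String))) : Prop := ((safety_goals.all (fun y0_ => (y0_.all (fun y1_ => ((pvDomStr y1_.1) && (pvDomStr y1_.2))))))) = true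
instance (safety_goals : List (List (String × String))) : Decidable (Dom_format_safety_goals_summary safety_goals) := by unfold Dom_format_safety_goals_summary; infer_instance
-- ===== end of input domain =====

-- B drops A's grouping dictionary: it emits each ASIL section by filtering the input list directly (simpler; return-value equivalence only).

-- sg.get('asil', 'Unknown') — the same expression occurs in both Pythons
def fsgsKey (sg : List (String × String)) : String :=
  (PySem.Dict.mk sg).getD "asil" "Unknown"

-- ===== PORT A =====
-- loop body of A's grouping loop: 'if asil not in by_asil: by_asil[asil] = []' then 'by_asil[asil].append(sg)'
def fsgsGroupStep (d : PySem.Dict String (List (List (String × String))))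
    (sg : List (String × String)) : PySem.Dict String (List (List (String × String))) :=
  let asil := fsgsKey sg
  let d := if d.contains asil then d else d.insert asil []
  d.modify asil [] (· ++ [sg])

-- f"- {sg['id']}: {sg['description'][:80]}...\n"; where Python raises KeyError the port reads "" (excluded by Pre_)
def fsgsLineA (sg : List (String × String)) : String :=
  "- " ++ (PySem.Dict.mk sg).getD "id" "" ++ ": " ++
    PySem.Str.slice ((PySem.Dict.mk sg).getD "description" "") none (some 80) ++ "...\n"

-- loop body of A's display loop over ['D','C','B','A']
def fsgsEmitA (by_asil : PySem.Dict String (List (List (String × String))))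
    (summary : String) (asil : String) : String :=
  if by_asil.contains asil then
    let grp := by_asil.getD asil []
    let summary := summary ++ "\n**ASIL " ++ asil ++ "** (" ++
      PySem.Int.toStr (grp.length : Int) ++ " goals):\n"
    let summary := (PySem.List.slice grp none (some 5)).foldl (fun s sg => s ++ fsgsLineA sg) summary
    if 5 < grp.length then
      summary ++ "  ... and " ++ PySem.Int.toStr ((grp.length : Int) - 5) ++ " more\n"
    else summary
  else summary

def format_safety_goals_summary (safety_goals : List (List (String × String))) : String :=
  if safety_goals = [] then "No safety goals found"
  else
    let summary := "Total Safety Goals: " ++ PySem.Int.toStr (safety_goals.length : Int) ++ "\n\n"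
    let by_asil := safety_goals.foldl fsgsGroupStep PySem.Dict.empty
    (["D", "C", "B", "A"] : List String).foldl (fsgsEmitA by_asil) summary

-- ===== PORT B =====
def fsgsLineB (sg : List (String × String)) : String :=
  "- " ++ (PySem.Dict.mk sg).getD "id" "" ++ ": " ++
    PySem.Str.slice ((PySem.Dict.mk sg).getD "description" "") none (some 80) ++ "...\n"

-- _section(asil, goals) of Source B
def fsgs_section (asil : String) (goals : List (List (String × String))) : String :=
  let group := goals.filter (fun sg => fsgsKey sg == asil)
  if group = [] then ""
  else
    let lines := ("\n**ASIL " ++ asil ++ "** (" ++ PySem.Int.toStr (group.length : Int) ++ " goals):\n")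
      :: (PySem.List.slice group none (some 5)).map fsgsLineB
    let lines := if 5 < group.length then
        lines ++ ["  ... and " ++ PySem.Int.toStr ((group.length : Int) - 5) ++ " more\n"]
      else lines
    PySem.Str.join "" lines

def format_safety_goals_summary_alt (safety_goals : List (List (String × String))) : String :=
  if safety_goals = [] then "No safety goals found"
  else
    "Total Safety Goals: " ++ PySem.Int.toStr (safety_goals.length : Int) ++ "\n\n" ++
      PySem.Str.join "" ((["D", "C", "B", "A"] : List String).map (fun asil => fsgs_section asil safety_goals))

-- ===== PRECONDITION & SPEC =====
-- Pre_ excludes exactly the inputs where Python A raises KeyError: a goal among the first 5 of a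
-- displayed ASIL group ('D'/'C'/'B'/'A') that lacks an 'id' or 'description' key.  (B raises there too.)
def Pre_format_safety_goals_summary (safety_goals : List (List (String × String))) : Prop :=
  ∀ a ∈ (["D", "C", "B", "A"] : List String),
    ∀ sg ∈ (safety_goals.filter (fun sg => fsgsKey sg == a)).take 5,
      (PySem.Dict.mk sg).contains "id" = true ∧ (PySem.Dict.mk sg).contains "description" = true
instance (safety_goals : List (List (String × String))) : Decidable (Pre_format_safety_goals_summary safety_goals) := by
  unfold Pre_format_safety_goals_summary; infer_instance

def pvWitness_format_safety_goals_summary : (List (List (String × String))) :=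
  ([[("asil", "D"), ("id", "SG-1"), ("description", "Avoid unintended braking")],
    [("asil", "QM")]])

def Spec_format_safety_goals_summary (safety_goals : List (List (String × String))) (out : String) : Prop := out = format_safety_goals_summary_alt safety_goals
instance (safety_goals : List (List (String × String))) (out : String) : Decidable (Spec_format_safety_goals_summary safety_goals out) := by unfold Spec_format_safety_goals_summary; infer_instance

-- ===== CLAIM (what is proved, stated in full; the proofs are below) =====
def Claim_equal_format_safety_goals_summary : Prop := ∀ (safety_goals : List (List (String × String))), Dom_format_safety_goals_summary safety_goals → Pre_format_safety_goals_summary safety_goals → Spec_format_safety_goals_summary safety_goals (format_safety_goals_summary safety_goals)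

-- ===== LEMMAS AND PROOFS =====

-- the grouping dict's entry at a is exactly the filter of the input
theorem fsgs_getD_foldl (l : List (List (String × String)))
    (d : PySem.Dict String (List (List (String × String)))) (a : String) :
    (l.foldl fsgsGroupStep d).getD a [] = d.getD a [] ++ l.filter (fun sg => fsgsKey sg == a) := by
  induction l generalizing d with
  | nil => simp
  | cons x xs ih =>
    simp only [List.foldl_cons, List.filter_cons, ih]
    have hstep : (fsgsGroupStep d x).getD a [] =
        if fsgsKey x == a then d.getD a [] ++ [x] else d.getD a [] := by
      unfold fsgsGroupStep
      by_cases hax : a = fsgsKey x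
      · by_cases hc : d.contains (fsgsKey x) = true
        · simp [hc, hax]
        · simp only [Bool.not_eq_true] at hc
          simp [hc, hax,
            PySem.Dict.getD_of_not_contains d ([] : List (List (String × String))) hc]
      · have hax' : ¬ fsgsKey x = a := fun h => hax h.symm
        by_cases hc : d.contains (fsgsKey x) = true
        · simp [hc, PySem.Dict.getD_modify, hax, hax']
        · simp only [Bool.not_eq_true] at hc
          simp [hc, PySem.Dict.getD_modify, PySem.Dict.getD_insert, hax, hax']
    rw [hstep]
    by_cases hk : (fsgsKey x == a) = true
    · simp [hk]
    · simp [hk]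

-- membership in the grouping dict is nonemptiness of the filter
theorem fsgs_contains_foldl (l : List (List (String × String)))
    (d : PySem.Dict String (List (List (String × String)))) (a : String) :
    (l.foldl fsgsGroupStep d).contains a = (d.contains a || l.any (fun sg => fsgsKey sg == a)) := by
  induction l generalizing d with
  | nil => simp
  | cons x xs ih =>
    simp only [List.foldl_cons, List.any_cons, ih]
    have hstep : (fsgsGroupStep d x).contains a = ((fsgsKey x == a) || d.contains a) := by
      unfold fsgsGroupStep
      by_cases hc : d.contains (fsgsKey x) = true
      · by_cases hax : a = fsgsKey x <;> simp [hax, hc, PySem.Dict.contains_modify, BEq.comm]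
      · simp only [Bool.not_eq_true] at hc
        by_cases hax : a = fsgsKey x <;>
          simp [hax, hc, PySem.Dict.contains_modify, PySem.Dict.contains_insert, BEq.comm]
    rw [hstep]
    cases h1 : (fsgsKey x == a) <;> cases h2 : d.contains a <;> simp

theorem fsgs_join_nil : PySem.Str.join "" ([] : List String) = "" := by
  apply String.toList_inj.mp
  simp [PySem.Chars.join_nil]

theorem fsgs_join_cons (x : String) (xs : List String) :
    PySem.Str.join "" (x :: xs) = x ++ PySem.Str.join "" xs := by
  apply String.toList_inj.mp
  cases xs with
  | nil => simp [PySem.Chars.join_singleton, PySem.Chars.join_nil]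
  | cons y ys => simp [PySem.Chars.join_cons_cons]

theorem fsgs_join_append_singleton (xs : List String) (y : String) :
    PySem.Str.join "" (xs ++ [y]) = PySem.Str.join "" xs ++ y := by
  induction xs with
  | nil => rw [List.nil_append, fsgs_join_cons, fsgs_join_nil]; simp
  | cons a t ih => rw [List.cons_append, fsgs_join_cons, fsgs_join_cons, ih, String.append_assoc]

-- A's bullet loop over the (same) group equals B's map-then-join
theorem fsgs_lines_foldl (L : List (List (String × String))) (s : String) :
    L.foldl (fun s sg => s ++ fsgsLineA sg) s = s ++ PySem.Str.join "" (L.map fsgsLineB) := by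
  induction L generalizing s with
  | nil => simp [fsgs_join_nil]
  | cons x xs ih =>
    have hline : fsgsLineA x = fsgsLineB x := rfl
    simp only [List.foldl_cons, List.map_cons, fsgs_join_cons, ih, hline, String.append_assoc]

-- one step of A's display loop adds exactly B's section for that ASIL
theorem fsgs_emit_eq (goals : List (List (String × String))) (s a : String) :
    fsgsEmitA (goals.foldl fsgsGroupStep PySem.Dict.empty) s a = s ++ fsgs_section a goals := by
  unfold fsgsEmitA fsgs_section
  rw [fsgs_contains_foldl, fsgs_getD_foldl]
  simp only [PySem.Dict.contains_empty, PySem.Dict.getD_empty, Bool.false_or, List.nil_append]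
  by_cases hne : goals.filter (fun sg => fsgsKey sg == a) = []
  · have hany : goals.any (fun sg => fsgsKey sg == a) = false := by
      simpa [List.filter_eq_nil_iff] using hne
    simp [hne, hany]
  · have hany : goals.any (fun sg => fsgsKey sg == a) = true := by
      rcases List.exists_mem_of_ne_nil _ hne with ⟨x, hx⟩
      rcases List.mem_filter.mp hx with ⟨hx1, hx2⟩
      exact List.any_eq_true.mpr ⟨x, hx1, hx2⟩
    simp only [hany, if_true, hne, if_false]
    rw [fsgs_lines_foldl]
    by_cases h5 : 5 < (goals.filter (fun sg => fsgsKey sg == a)).length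
    · simp only [h5, if_true, fsgs_join_append_singleton, fsgs_join_cons, String.append_assoc]
    · simp only [h5, if_false, fsgs_join_cons, String.append_assoc]

-- ===== VERDICT (by name: the statement is the Claim_ definition above) =====
theorem format_safety_goals_summary_spec : Claim_equal_format_safety_goals_summary := by
  intro safety_goals _ _
  unfold Spec_format_safety_goals_summary format_safety_goals_summary format_safety_goals_summary_alt
  by_cases h : safety_goals = []
  · simp [h]
  · simp only [h, if_false, List.foldl_cons, List.foldl_nil, List.map_cons, List.map_nil,
      fsgs_emit_eq, fsgs_join_cons, fsgs_join_nil, String.append_assoc]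
    simp
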